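-- pv_equiv track=rewrite | github.com/pypi-data/pypi-mirror-403 | packages/um80/um80-0.3.33-py3-none-any.whl/um80/um80.py | split_on_exclamation
-- ===== SOURCE A (Python) =====
-- def split_on_exclamation(line):
--     """
--     DRI extension: Split a line on '!' separator, respecting strings.
--     Returns list of statement strings. Each statement after the first
--     should be treated as having no label.
--     Example: "PUSH H! PUSH D! PUSH B" -> ["PUSH H", " PUSH D", " PUSH B"]
--     """
--     # First, find the comment (if any) and separate it
--     comment = ''
--     in_string = False
--     string_char = None
--     comment_pos = -1
--     for i, ch in enumerate(line):
--         if in_string: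
--             if ch == string_char:
--                 in_string = False
--         elif ch in "'\"":
--             in_string = True
--             string_char = ch
--         elif ch == ';':
--             comment = line[i:]  # Include the semicolon
--             comment_pos = i
--             break
--
--     if comment_pos >= 0:
--         line = line[:comment_pos]
--
--     # Now split on '!' while respecting strings
--     result = []
--     current = ''
--     in_string = False
--     string_char = None
--
--     for ch in line:
--         if in_string:
--             current += ch
--             if ch == string_char:
--                 in_string = False
--         elif ch in "'\"":
--             in_string = True
--             string_char = ch
--             current += ch
--         elif ch == '!':
--             result.append(current)
--             current = ''
--         else:
--             current += ch
--
--     # Add the last segment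
--     result.append(current)
--
--     # Append comment to the last segment
--     if comment and result:
--         result[-1] = result[-1] + comment
--
--     return result
-- ===== SOURCE B (Python) =====
-- def split_on_exclamation(line):
--     """Single pass: split on '!' respecting strings, breaking at a comment ';'."""
--     result = []
--     current = ''
--     comment = ''
--     in_string = False
--     string_char = None
--     for i, ch in enumerate(line):
--         if in_string:
--             current += ch
--             if ch == string_char:
--                 in_string = False
--         elif ch in "'\"":
--             in_string = True
--             string_char = ch
--             current += ch
--         elif ch == '!':
--             result.append(current)
--             current = ''
--         elif ch == ';':
--             comment = line[i:]
--             break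
--         else:
--             current += ch
--     result.append(current)
--     if comment:
--         result[-1] = result[-1] + comment
--     return result
-- ===== Notes on version B (the rewrite author's own statement) =====
-- stated objective: simpler
-- what changed: A scans the line twice (one pass to locate the comment start with string tracking, then a second pass over the truncated line to split on the separator); B does the whole job in a single pass that splits as it goes and breaks out at an unquoted comment start, attaching the remainder of the line to the last segment.
import Mathlib
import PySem

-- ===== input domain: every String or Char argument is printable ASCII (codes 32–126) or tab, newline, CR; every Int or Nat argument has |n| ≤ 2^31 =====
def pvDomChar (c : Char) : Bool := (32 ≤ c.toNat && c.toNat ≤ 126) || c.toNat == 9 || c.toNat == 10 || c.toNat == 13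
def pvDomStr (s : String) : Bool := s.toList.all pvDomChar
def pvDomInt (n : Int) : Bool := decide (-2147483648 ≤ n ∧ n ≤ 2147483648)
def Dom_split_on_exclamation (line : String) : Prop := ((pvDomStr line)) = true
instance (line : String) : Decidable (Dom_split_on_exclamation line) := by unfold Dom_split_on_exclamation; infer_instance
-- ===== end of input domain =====

-- B fuses A's two linear scans (find-comment pass, then split pass) into one pass that breaks at ';'; objective: simpler.


-- ===== PORT A =====
-- result[-1] = result[-1] + comment
def pvModifyLast (rs : List (List Char)) (c : List Char) : List (List Char) :=
  match rs with
  | [] => []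
  | [x] => [x ++ c]
  | x :: xs => x :: pvModifyLast xs c

-- A's first loop: 'for i, ch in enumerate(line): … break' → structural recursion carrying i
def pvFindCommentA (cs : List Char) (i : Nat) (inStr : Bool) (sc : Option Char) : Option Nat :=
  match cs with
  | [] => none
  | ch :: rest =>
    if inStr then
      pvFindCommentA rest (i + 1) (if some ch = sc then false else true) sc
    else if ch = '\'' ∨ ch = '"' then
      pvFindCommentA rest (i + 1) true (some ch)
    else if ch = ';' then some i
    else pvFindCommentA rest (i + 1) inStr sc

-- A's second loop over the (possibly truncated) line; returns (result, current)
def pvSplitLoopA (cs : List Char) (result : List (List Char)) (current : List Char)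
    (inStr : Bool) (sc : Option Char) : List (List Char) × List Char :=
  match cs with
  | [] => (result, current)
  | ch :: rest =>
    if inStr then
      pvSplitLoopA rest result (current ++ [ch]) (if some ch = sc then false else true) sc
    else if ch = '\'' ∨ ch = '"' then
      pvSplitLoopA rest result (current ++ [ch]) true (some ch)
    else if ch = '!' then
      pvSplitLoopA rest (result ++ [current]) [] inStr sc
    else pvSplitLoopA rest result (current ++ [ch]) inStr sc

-- line[:i] / line[i:] with i an enumerate index (0 ≤ i < len(line)) are exactly take/drop
def split_on_exclamation (line : String) : List String :=
  let cs := line.toList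
  match pvFindCommentA cs 0 false none with
  | some i =>
    let comment := cs.drop i
    let body := cs.take i
    let p := pvSplitLoopA body [] [] false none
    let res := p.1 ++ [p.2]
    (if comment ≠ [] ∧ res ≠ [] then pvModifyLast res comment else res).map String.ofList
  | none =>
    let p := pvSplitLoopA cs [] [] false none
    (p.1 ++ [p.2]).map String.ofList

-- ===== PORT B =====
-- one pass; on ';' outside a string the rest of the line (ch :: rest = line[i:]) is the comment
def pvSplitLoopB (cs : List Char) (current : List Char) (result : List (List Char))
    (inStr : Bool) (sc : Option Char) : List (List Char) :=
  match cs with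
  | [] => result ++ [current]
  | ch :: rest =>
    if inStr then
      pvSplitLoopB rest (current ++ [ch]) result (if some ch = sc then false else true) sc
    else if ch = '\'' ∨ ch = '"' then
      pvSplitLoopB rest (current ++ [ch]) result true (some ch)
    else if ch = '!' then
      pvSplitLoopB rest [] (result ++ [current]) inStr sc
    else if ch = ';' then
      pvModifyLast (result ++ [current]) (ch :: rest)
    else pvSplitLoopB rest (current ++ [ch]) result inStr sc

def split_on_exclamation_alt (line : String) : List String :=
  (pvSplitLoopB line.toList [] [] false none).map String.ofList

-- ===== PRECONDITION & SPEC =====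
def Spec_split_on_exclamation (line : String) (out : List String) : Prop := out = split_on_exclamation_alt line
instance (line : String) (out : List String) : Decidable (Spec_split_on_exclamation line out) := by unfold Spec_split_on_exclamation; infer_instance

-- ===== CLAIM (what is proved, stated in full; the proofs are below) =====
def Claim_equal_split_on_exclamation : Prop := ∀ (line : String), Dom_split_on_exclamation line → Spec_split_on_exclamation line (split_on_exclamation line)

-- ===== LEMMAS AND PROOFS =====

lemma pvFindCommentA_shift (cs : List Char) (i : Nat) (inStr : Bool) (sc : Option Char) :
    pvFindCommentA cs i inStr sc = (pvFindCommentA cs 0 inStr sc).map (· + i) := by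
  induction cs generalizing i inStr sc with
  | nil => rfl
  | cons ch rest ih =>
    cases inStr with
    | true =>
      have step : ∀ j, pvFindCommentA (ch :: rest) j true sc
          = pvFindCommentA rest (j + 1) (if some ch = sc then false else true) sc := fun _ => rfl
      rw [step, step, ih (i + 1), ih (0 + 1)]
      cases hF : pvFindCommentA rest 0 (if some ch = sc then false else true) sc <;> simp <;> omega
    | false =>
      by_cases hq : ch = '\'' ∨ ch = '"'
      · have step : ∀ j, pvFindCommentA (ch :: rest) j false sc
            = pvFindCommentA rest (j + 1) true (some ch) := by
          intro j; simp [pvFindCommentA, hq]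
        rw [step, step, ih (i + 1), ih (0 + 1)]
        cases hF : pvFindCommentA rest 0 true (some ch) <;> simp <;> omega
      · by_cases hs : ch = ';'
        · simp [pvFindCommentA, hq, hs]
        · have step : ∀ j, pvFindCommentA (ch :: rest) j false sc
              = pvFindCommentA rest (j + 1) false sc := by
            intro j; simp [pvFindCommentA, hq, hs]
          rw [step, step, ih (i + 1), ih (0 + 1)]
          cases hF : pvFindCommentA rest 0 false sc <;> simp <;> omega

lemma pvFindCommentA_lt (cs : List Char) (inStr : Bool) (sc : Option Char) (i : Nat)
    (h : pvFindCommentA cs 0 inStr sc = some i) : i < cs.length := by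
  induction cs generalizing inStr sc i with
  | nil => simp [pvFindCommentA] at h
  | cons ch rest ih =>
    simp only [List.length_cons]
    cases inStr with
    | true =>
      have step : pvFindCommentA (ch :: rest) 0 true sc
          = pvFindCommentA rest (0 + 1) (if some ch = sc then false else true) sc := rfl
      rw [step, pvFindCommentA_shift] at h
      rcases Option.map_eq_some_iff.mp h with ⟨j, hj, rfl⟩
      have := ih _ _ _ hj; omega
    | false =>
      by_cases hq : ch = '\'' ∨ ch = '"'
      · have step : pvFindCommentA (ch :: rest) 0 false sc
            = pvFindCommentA rest (0 + 1) true (some ch) := by simp [pvFindCommentA, hq]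
        rw [step, pvFindCommentA_shift] at h
        rcases Option.map_eq_some_iff.mp h with ⟨j, hj, rfl⟩
        have := ih _ _ _ hj; omega
      · by_cases hs : ch = ';'
        · simp [pvFindCommentA, hq, hs] at h; omega
        · have step : pvFindCommentA (ch :: rest) 0 false sc
              = pvFindCommentA rest (0 + 1) false sc := by simp [pvFindCommentA, hq, hs]
          rw [step, pvFindCommentA_shift] at h
          rcases Option.map_eq_some_iff.mp h with ⟨j, hj, rfl⟩
          have := ih _ _ _ hj; omega

-- B's fused pass equals: find the comment, run A's split pass on the prefix, attach the comment
lemma pvSplitLoopB_eq (cs : List Char) (current : List Char) (result : List (List Char))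
    (inStr : Bool) (sc : Option Char) :
    pvSplitLoopB cs current result inStr sc =
      match pvFindCommentA cs 0 inStr sc with
      | none => (pvSplitLoopA cs result current inStr sc).1 ++ [(pvSplitLoopA cs result current inStr sc).2]
      | some i =>
        let p := pvSplitLoopA (cs.take i) result current inStr sc
        pvModifyLast (p.1 ++ [p.2]) (cs.drop i) := by
  induction cs generalizing current result inStr sc with
  | nil => rfl
  | cons ch rest ih =>
    cases inStr with
    | true =>
      have hb : pvSplitLoopB (ch :: rest) current result true sc
          = pvSplitLoopB rest (current ++ [ch]) result (if some ch = sc then false else true) sc := rfl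
      have hf : pvFindCommentA (ch :: rest) 0 true sc
          = (pvFindCommentA rest 0 (if some ch = sc then false else true) sc).map (· + 1) := by
        have step : pvFindCommentA (ch :: rest) 0 true sc
            = pvFindCommentA rest (0 + 1) (if some ch = sc then false else true) sc := rfl
        rw [step, pvFindCommentA_shift]
      have ha : ∀ xs r c, pvSplitLoopA (ch :: xs) r c true sc
          = pvSplitLoopA xs r (c ++ [ch]) (if some ch = sc then false else true) sc := fun _ _ _ => rfl
      rw [hb, ih, hf]
      cases hF : pvFindCommentA rest 0 (if some ch = sc then false else true) sc with
      | none => simp [ha]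
      | some j => simp [ha, List.take_succ_cons, List.drop_succ_cons]
    | false =>
      by_cases hq : ch = '\'' ∨ ch = '"'
      · have hb : pvSplitLoopB (ch :: rest) current result false sc
            = pvSplitLoopB rest (current ++ [ch]) result true (some ch) := by
          simp [pvSplitLoopB, hq]
        have hf : pvFindCommentA (ch :: rest) 0 false sc
            = (pvFindCommentA rest 0 true (some ch)).map (· + 1) := by
          have step : pvFindCommentA (ch :: rest) 0 false sc
              = pvFindCommentA rest (0 + 1) true (some ch) := by simp [pvFindCommentA, hq]
          rw [step, pvFindCommentA_shift]
        have ha : ∀ xs r c, pvSplitLoopA (ch :: xs) r c false sc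
            = pvSplitLoopA xs r (c ++ [ch]) true (some ch) := by
          intro xs r c; simp [pvSplitLoopA, hq]
        rw [hb, ih, hf]
        cases hF : pvFindCommentA rest 0 true (some ch) with
        | none => simp [ha]
        | some j => simp [ha, List.take_succ_cons, List.drop_succ_cons]
      · by_cases he : ch = '!'
        · have hs : ¬ ch = ';' := by rw [he]; decide
          have hb : pvSplitLoopB (ch :: rest) current result false sc
              = pvSplitLoopB rest [] (result ++ [current]) false sc := by
            simp [pvSplitLoopB, hq, he]
          have hf : pvFindCommentA (ch :: rest) 0 false sc
              = (pvFindCommentA rest 0 false sc).map (· + 1) := by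
            have step : pvFindCommentA (ch :: rest) 0 false sc
                = pvFindCommentA rest (0 + 1) false sc := by simp [pvFindCommentA, hq, hs]
            rw [step, pvFindCommentA_shift]
          have ha : ∀ xs r c, pvSplitLoopA (ch :: xs) r c false sc
              = pvSplitLoopA xs (r ++ [c]) [] false sc := by
            intro xs r c; simp [pvSplitLoopA, hq, he]
          rw [hb, ih, hf]
          cases hF : pvFindCommentA rest 0 false sc with
          | none => simp [ha]
          | some j => simp [ha, List.take_succ_cons, List.drop_succ_cons]
        · by_cases hs : ch = ';'
          · have hb : pvSplitLoopB (ch :: rest) current result false sc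
                = pvModifyLast (result ++ [current]) (ch :: rest) := by
              simp [pvSplitLoopB, hq, he, hs]
            have hf : pvFindCommentA (ch :: rest) 0 false sc = some 0 := by
              simp [pvFindCommentA, hq, hs]
            rw [hb, hf]
            simp [pvSplitLoopA]
          · have hb : pvSplitLoopB (ch :: rest) current result false sc
                = pvSplitLoopB rest (current ++ [ch]) result false sc := by
              simp [pvSplitLoopB, hq, he, hs]
            have hf : pvFindCommentA (ch :: rest) 0 false sc
                = (pvFindCommentA rest 0 false sc).map (· + 1) := by
              have step : pvFindCommentA (ch :: rest) 0 false sc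
                  = pvFindCommentA rest (0 + 1) false sc := by simp [pvFindCommentA, hq, hs]
              rw [step, pvFindCommentA_shift]
            have ha : ∀ xs r c, pvSplitLoopA (ch :: xs) r c false sc
                = pvSplitLoopA xs r (c ++ [ch]) false sc := by
              intro xs r c; simp [pvSplitLoopA, hq, he, hs]
            rw [hb, ih, hf]
            cases hF : pvFindCommentA rest 0 false sc with
            | none => simp [ha]
            | some j => simp [ha, List.take_succ_cons, List.drop_succ_cons]

-- ===== VERDICT (by name: the statement is the Claim_ definition above) =====
theorem split_on_exclamation_spec : Claim_equal_split_on_exclamation := by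
  intro line _
  unfold Spec_split_on_exclamation split_on_exclamation split_on_exclamation_alt
  rw [pvSplitLoopB_eq]
  cases hf : pvFindCommentA line.toList 0 false none with
  | none => simp only [hf]
  | some i =>
    have hlt := pvFindCommentA_lt _ _ _ _ hf
    have hdrop : line.toList.drop i ≠ [] := by
      rw [Ne, List.drop_eq_nil_iff]; omega
    simp only [hf]
    rw [if_pos ⟨hdrop, by simp⟩]
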